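-- pv_equiv track=rewrite | github.com/Philodoescode/GridClash | tests/run_test_scenario.py | _find_closest_pos
-- ===== SOURCE A (Python) =====
-- def _find_closest_pos(pos_list, ts, threshold=200):
--     """
--     DEPRECATED: This function is no longer used with synchronized sampling.
--
--     With the new unified broadcast_timestamp_ms approach, both server and client
--     logs use the exact same timestamp, enabling O(1) dictionary lookup instead
--     of this fuzzy timestamp matching.
--
--     Kept for backward compatibility when processing old test data that used
--     different sampling rates for server (20Hz) and client (~1000Hz).
--
--     Args:
--         pos_list: List of (ts, x, y) tuples, sorted by ts
--         ts: Target timestamp to find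
--         threshold: Maximum time difference allowed (ms)
--
--     Returns:
--         Closest position tuple (ts, x, y) or None if no match within threshold
--     """
--     if not pos_list:
--         return None
--     # Assuming pos_list is sorted by ts
--     # Binary search could be better but list is likely moderate size or linear scan ok
--     # Let's use simple filtered min for robustness as in original code
--     # Optimization: bisect
--     import bisect
--     # pos_list elements are (ts, x, y)
--     keys = [p[0] for p in pos_list]
--     idx = bisect.bisect_left(keys, ts)
--
--     candidates = []
--     if idx < len(pos_list):
--         candidates.append(pos_list[idx])
--     if idx > 0:
--         candidates.append(pos_list[idx - 1])
--
--     valid = [p for p in candidates if abs(p[0] - ts) <= threshold]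
--     if not valid:
--         return None
--     return min(valid, key=lambda p: abs(p[0] - ts))
-- ===== SOURCE B (Python) =====
-- def _find_closest_pos(pos_list, ts, threshold=200):
--     # One linear pass: remember the last entry strictly below ts and the first
--     # entry at/above ts (on a ts-sorted list these are the only possible answers),
--     # then choose between the two with the threshold test, preferring the later
--     # one on an exact distance tie.
--     before = None
--     after = None
--     for p in pos_list:
--         if p[0] < ts:
--             before = p
--         elif after is None:
--             after = p
--     best = None
--     for p in (before, after):
--         if p is not None and abs(p[0] - ts) <= threshold:
--             if best is None or abs(p[0] - ts) <= abs(best[0] - ts):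
--                 best = p
--     return best
-- ===== Notes on version B (the rewrite author's own statement) =====
-- stated objective: alternative
-- what changed: B replaces A's keys-list build + bisect + candidates/filter/min lists by a single linear pass that tracks the last entry below ts and the first entry at/above it, then chooses between those two with plain conditionals.
-- outside the precondition, e.g. on _find_closest_pos([(4, -4), (-1, -4), (2, 2)], 1, 200): A returns (2, 2), B returns (-1, -4); on _find_closest_pos([(), (1, 2)], 1, 200): A raises IndexError, B raises IndexError
import Mathlib
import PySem

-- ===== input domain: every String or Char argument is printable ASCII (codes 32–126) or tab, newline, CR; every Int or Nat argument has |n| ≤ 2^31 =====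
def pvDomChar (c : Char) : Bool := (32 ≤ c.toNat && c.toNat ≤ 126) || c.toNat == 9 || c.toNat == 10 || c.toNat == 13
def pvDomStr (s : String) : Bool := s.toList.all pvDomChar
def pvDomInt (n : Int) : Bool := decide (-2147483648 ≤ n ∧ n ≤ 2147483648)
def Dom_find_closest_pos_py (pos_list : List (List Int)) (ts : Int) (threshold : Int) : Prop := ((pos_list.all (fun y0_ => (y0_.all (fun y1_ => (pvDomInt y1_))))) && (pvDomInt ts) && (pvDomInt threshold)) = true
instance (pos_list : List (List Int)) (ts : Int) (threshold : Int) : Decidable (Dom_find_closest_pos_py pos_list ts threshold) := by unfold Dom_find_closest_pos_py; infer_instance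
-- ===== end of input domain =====

-- B replaces A's keys-list build + bisect + candidate/filter/min lists by ONE linear
-- pass tracking the last entry below ts and the first at/above it (objective: alternative).

-- ===== PORT A =====
-- p[0] is ported as p.headD 0: exact whenever every element of pos_list is nonempty (Pre_).
def find_closest_pos_py (pos_list : List (List Int)) (ts : Int) (threshold : Int) : Option (List Int) :=
  if pos_list = [] then none
  else
    let keys := pos_list.map (fun p => p.headD 0)
    let idx := PySem.List.bisectLeft keys ts
    let candidates :=
      (if idx < pos_list.length then [pos_list.getD idx []] else []) ++
      (if 0 < idx then [pos_list.getD (idx - 1) []] else [])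
    let valid := candidates.filter (fun p => |p.headD 0 - ts| ≤ threshold)
    if valid = [] then none
    else PySem.List.min? valid (fun p => |p.headD 0 - ts|)

-- ===== PORT B =====
-- Source B's first loop: state (before, after)
def pvStep (ts : Int) (st : Option (List Int) × Option (List Int)) (p : List Int) :
    Option (List Int) × Option (List Int) :=
  if p.headD 0 < ts then (some p, st.2)
  else match st.2 with
    | none => (st.1, some p)
    | some _ => st

-- Source B's second loop body: fold one candidate into `best`
def pvPick (ts threshold : Int) (best : Option (List Int)) (po : Option (List Int)) :
    Option (List Int) :=
  match po with
  | none => best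
  | some p =>
    if |p.headD 0 - ts| ≤ threshold then
      match best with
      | none => some p
      | some b => if |p.headD 0 - ts| ≤ |b.headD 0 - ts| then some p else some b
    else best

def find_closest_pos_py_alt (pos_list : List (List Int)) (ts : Int) (threshold : Int) :
    Option (List Int) :=
  let st := pos_list.foldl (pvStep ts) (none, none)
  [st.1, st.2].foldl (pvPick ts threshold) none

-- ===== PRECONDITION & SPEC =====
-- Pre_ excludes (a) lists with an empty inner tuple, on which Python's p[0] raises
-- IndexError, and (b) lists in which some entry with timestamp < ts comes after an entry
-- with timestamp ≥ ts: the function's contract requires pos_list sorted by ts ("Assuming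
-- pos_list is sorted by ts") — Pre_ asks only for the partition property that bisect
-- needs (every ts-sorted list has it); on other lists which element A's bisect lands on
-- is an accident of binary-search probe order.
def Pre_find_closest_pos_py (pos_list : List (List Int)) (ts : Int) (threshold : Int) : Prop :=
  (∀ p ∈ pos_list, p ≠ []) ∧
  ∀ p ∈ pos_list.dropWhile (fun q => decide (q.headD 0 < ts)), ¬ (p.headD 0 < ts)
instance (pos_list : List (List Int)) (ts : Int) (threshold : Int) : Decidable (Pre_find_closest_pos_py pos_list ts threshold) := by unfold Pre_find_closest_pos_py; infer_instance

def pvWitness_find_closest_pos_py : List (List Int) × Int × Int := ([[1, 2, 3], [5, 0, 0]], 4, 200)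

def Spec_find_closest_pos_py (pos_list : List (List Int)) (ts : Int) (threshold : Int) (out : Option (List Int)) : Prop := out = find_closest_pos_py_alt pos_list ts threshold
instance (pos_list : List (List Int)) (ts : Int) (threshold : Int) (out : Option (List Int)) : Decidable (Spec_find_closest_pos_py pos_list ts threshold out) := by unfold Spec_find_closest_pos_py; infer_instance

-- ===== CLAIM (what is proved, stated in full; the proofs are below) =====
def Claim_equal_find_closest_pos_py : Prop := ∀ (pos_list : List (List Int)) (ts : Int) (threshold : Int), Dom_find_closest_pos_py pos_list ts threshold → Pre_find_closest_pos_py pos_list ts threshold → Spec_find_closest_pos_py pos_list ts threshold (find_closest_pos_py pos_list ts threshold)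

-- ===== LEMMAS AND PROOFS =====

-- folding the first loop over entries all strictly below ts: `after` untouched,
-- `before` becomes the last such entry (or stays)
theorem pvStep_all_lt (ts : Int) (L : List (List Int)) (h : ∀ p ∈ L, p.headD 0 < ts) :
    ∀ (b a : Option (List Int)),
      L.foldl (pvStep ts) (b, a) = (L.getLast?.or b, a) := by
  induction L with
  | nil => intro b a; rfl
  | cons p L' ih =>
    intro b a
    have hp : p.headD 0 < ts := h p (by simp)
    have step1 : pvStep ts (b, a) p = (some p, a) := by
      simp only [pvStep]; rw [if_pos hp]
    rw [List.foldl_cons, step1, ih (fun q hq => h q (by simp [hq]))]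
    cases L' with
    | nil => simp
    | cons q L'' =>
      simp [List.getLast?_cons_cons]
      cases hgl : (q :: L'').getLast? with
      | none => simp [List.getLast?_eq_none_iff] at hgl
      | some x => simp

-- folding the first loop with `after` already set over entries at/above ts: no change
theorem pvStep_all_ge_some (ts : Int) (R : List (List Int)) (h : ∀ p ∈ R, ts ≤ p.headD 0) :
    ∀ (b : Option (List Int)) (x : List Int),
      R.foldl (pvStep ts) (b, some x) = (b, some x) := by
  induction R with
  | nil => intro b x; rfl
  | cons r R' ih =>
    intro b x
    have hr : ¬ r.headD 0 < ts := not_lt.2 (h r (by simp))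
    have step1 : pvStep ts (b, some x) r = (b, some x) := by
      simp only [pvStep]; rw [if_neg hr]
    rw [List.foldl_cons, step1, ih (fun q hq => h q (by simp [hq]))]

-- folding the first loop over entries all at/above ts: `after` becomes the first one
theorem pvStep_all_ge (ts : Int) (R : List (List Int)) (h : ∀ p ∈ R, ts ≤ p.headD 0)
    (b : Option (List Int)) :
    R.foldl (pvStep ts) (b, none) = (b, R.head?) := by
  cases R with
  | nil => rfl
  | cons r R' =>
    have hr : ¬ r.headD 0 < ts := not_lt.2 (h r (by simp))
    have step1 : pvStep ts (b, none) r = (b, some r) := by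
      simp only [pvStep]; rw [if_neg hr]
    rw [List.foldl_cons, step1,
      pvStep_all_ge_some ts R' (fun q hq => h q (by simp [hq])) b r]
    rfl

-- bisect_left's loop on a list whose entries below ts exactly occupy the first N slots
-- returns N (the partition property is all binary search needs)
theorem pvBisectLoop_partition (keys : List Int) (ts : Int) (N : Nat)
    (hlt : ∀ (j : Nat) (hj : j < keys.length), j < N → keys[j] < ts)
    (hge : ∀ (j : Nat) (hj : j < keys.length), N ≤ j → ¬ keys[j] < ts) :
    ∀ (fuel lo hi : Nat), lo ≤ N → N ≤ hi → hi ≤ keys.length → hi - lo ≤ fuel →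
      PySem.List.bisectLeftLoop keys ts fuel lo hi = N := by
  intro fuel
  induction fuel with
  | zero => intro lo hi h1 h2 h3 h4; simp [PySem.List.bisectLeftLoop]; omega
  | succ n ih =>
    intro lo hi h1 h2 h3 h4
    simp only [PySem.List.bisectLeftLoop]
    by_cases hlh : lo < hi
    case neg => simp [hlh]; omega
    case pos =>
      have hm : (lo + hi) / 2 < keys.length := by omega
      simp only [hlh, if_true]
      rw [List.getElem?_eq_getElem hm]
      simp only
      by_cases hcmp : keys[(lo + hi) / 2] < ts
      · have hmidN : (lo + hi) / 2 < N := by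
          by_contra hc
          exact hge _ hm (by omega) hcmp
        rw [if_pos hcmp]
        exact ih _ _ (by omega) h2 h3 (by omega)
      · have hNmid : N ≤ (lo + hi) / 2 := by
          by_contra hc
          exact hcmp (hlt _ hm (by omega))
        rw [if_neg hcmp]
        exact ih _ _ h1 hNmid (by omega) (by omega)

-- ===== VERDICT (by name: the statement is the Claim_ definition above) =====
theorem find_closest_pos_py_spec : Claim_equal_find_closest_pos_py := by
  intro pos_list ts threshold _hdom hpre
  obtain ⟨-, hpart⟩ := hpre
  unfold Spec_find_closest_pos_py find_closest_pos_py find_closest_pos_py_alt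
  set key : List Int → Int := fun p => p.headD 0 with hkey
  set pred : List Int → Bool := fun p => decide (key p < ts) with hpred
  set L := pos_list.takeWhile pred with hL
  set R := pos_list.dropWhile pred with hR
  have hsplit : L ++ R = pos_list := List.takeWhile_append_dropWhile
  -- every entry of L is strictly below ts
  have hLlt : ∀ p ∈ L, key p < ts := by
    intro p hp
    have := List.mem_takeWhile_imp hp
    simpa [hpred] using this
  -- every entry of R is at/above ts: exactly Pre_'s partition conjunct
  have hRge : ∀ p ∈ R, ts ≤ key p := by
    intro p hp
    refine not_lt.1 (hpart p ?_)
    simpa [hR, hpred, hkey] using hp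
  -- the bisect index equals |L|
  have hLlen : L.length ≤ pos_list.length := by
    conv_rhs => rw [← hsplit]
    simp
  have hltk : ∀ (j : Nat) (hj : j < (pos_list.map key).length), j < L.length →
      (pos_list.map key)[j] < ts := by
    intro j hj hjN
    rw [List.getElem_map]
    have hjlen : j < pos_list.length := by simpa using hj
    have e1 : L[j]? = some (pos_list[j]'hjlen) := by
      rw [← List.getElem?_append_left (l₂ := R) hjN, hsplit,
        List.getElem?_eq_getElem hjlen]
    exact hLlt _ (List.mem_of_getElem? e1)
  have hgek : ∀ (j : Nat) (hj : j < (pos_list.map key).length), L.length ≤ j →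
      ¬ (pos_list.map key)[j] < ts := by
    intro j hj hjN
    rw [List.getElem_map]
    have hjlen : j < pos_list.length := by simpa using hj
    have e1 : R[j - L.length]? = some (pos_list[j]'hjlen) := by
      rw [← List.getElem?_append_right (l₁ := L) hjN, hsplit,
        List.getElem?_eq_getElem hjlen]
    exact not_lt.2 (hRge _ (List.mem_of_getElem? e1))
  have hidx : PySem.List.bisectLeft (pos_list.map key) ts = L.length := by
    unfold PySem.List.bisectLeft
    exact pvBisectLoop_partition (pos_list.map key) ts L.length hltk hgek
      (pos_list.map key).length 0 (pos_list.map key).length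
      (Nat.zero_le _) (by simpa using hLlen) (le_refl _) (by omega)
  -- B's scan state
  have hscan : pos_list.foldl (pvStep ts) (none, none) = (L.getLast?, R.head?) := by
    conv_lhs => rw [← hsplit]
    rw [List.foldl_append, pvStep_all_lt ts L hLlt none none, Option.or_none,
      pvStep_all_ge ts R hRge L.getLast?]
  rw [hscan]
  -- empty list
  by_cases hnil : pos_list = []
  · have hLnil : L = [] := by simp [hL, hnil]
    have hRnil : R = [] := by simp [hR, hnil]
    simp [hnil, hLnil, hRnil, pvPick]
  · simp only [hnil, if_false, hidx]
    -- translate A's candidate accesses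
    have hRhead : ∀ (hRne : R ≠ []), pos_list.getD L.length [] = R.head hRne := by
      intro hRne
      have e1 : pos_list[L.length]? = some (R.head hRne) := by
        rw [← hsplit, List.getElem?_append_right (le_refl _), Nat.sub_self,
          ← List.head?_eq_getElem?, List.head?_eq_head]
      rw [List.getD_eq_getElem?_getD, e1]
      rfl
    have hLlast : ∀ (hLne : L ≠ []), pos_list.getD (L.length - 1) [] = L.getLast hLne := by
      intro hLne
      have hLpos : 0 < L.length := List.length_pos_of_ne_nil hLne
      have e1 : pos_list[L.length - 1]? = some (L.getLast hLne) := by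
        rw [← hsplit, List.getElem?_append_left (by omega),
          List.getElem?_eq_getElem (by omega : L.length - 1 < L.length)]
        rw [List.getLast_eq_getElem hLne]
      rw [List.getD_eq_getElem?_getD, e1]
      rfl
    -- case analysis on L, R empty or not
    by_cases hRne : R = []
    · -- idx = length, only `before` candidate
      have hlen : L.length = pos_list.length := by
        conv_rhs => rw [← hsplit]; simp [hRne]
      have hLne : L ≠ [] := by
        intro h; rw [h] at hlen; simp at hlen
        exact hnil (by rw [← hsplit, hRne, h]; rfl)
      have hLpos : 0 < L.length := List.length_pos_of_ne_nil hLne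
      rw [hRne]
      simp only [hlen, lt_irrefl, if_false, List.nil_append, hLpos, if_true,
        List.head?_eq_none_iff.2 rfl]
      rw [← hlen, hLlast hLne, List.getLast?_eq_getLast hLne]
      set b := L.getLast hLne with hb
      by_cases hvb : |b.head?.getD 0 - ts| ≤ threshold
      · simp [List.filter, hvb, hLpos, PySem.List.min?, pvPick]
      · simp [List.filter, hvb, hLpos, PySem.List.min?, pvPick]
    · -- `after` candidate exists
      have hnlen : L.length < pos_list.length := by
        conv_rhs => rw [← hsplit]
        have := List.length_pos_of_ne_nil hRne
        simp; omega
      rw [hRhead hRne]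
      set a := R.head hRne with ha
      have hRh : R.head? = some a := List.head?_eq_head hRne
      rw [hRh]
      simp only [hnlen, if_true]
      by_cases hLne : L = []
      · -- no `before`
        have : L.length = 0 := by simp [hLne]
        rw [this]
        simp only [lt_irrefl, if_false, List.append_nil, List.getLast?_eq_none_iff.2 hLne]
        by_cases hva : |a.head?.getD 0 - ts| ≤ threshold
        · simp [List.filter, hva, PySem.List.min?, pvPick]
        · simp [List.filter, hva, PySem.List.min?, pvPick]
      · have hLpos : 0 < L.length := List.length_pos_of_ne_nil hLne
        rw [hLlast hLne, List.getLast?_eq_getLast hLne]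
        set b := L.getLast hLne with hb
        simp only [hLpos, if_true]
        by_cases hva : |a.head?.getD 0 - ts| ≤ threshold <;>
          by_cases hvb : |b.head?.getD 0 - ts| ≤ threshold
        · -- both valid: A keeps `a` unless b strictly closer; B keeps `b` unless a ≤-closer
          by_cases htie : |b.head?.getD 0 - ts| < |a.head?.getD 0 - ts|
          · have h2 : ¬ |a.head?.getD 0 - ts| ≤ |b.head?.getD 0 - ts| := by omega
            simp [List.filter, hva, hvb, hLpos, PySem.List.min?, pvPick, htie, h2]
          · have h2 : |a.head?.getD 0 - ts| ≤ |b.head?.getD 0 - ts| := by omega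
            simp [List.filter, hva, hvb, hLpos, PySem.List.min?, pvPick, htie, h2]
        · simp [List.filter, hva, hvb, hLpos, PySem.List.min?, pvPick]
        · simp [List.filter, hva, hvb, hLpos, PySem.List.min?, pvPick]
        · simp [List.filter, hva, hvb, hLpos, PySem.List.min?, pvPick]
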